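-- pv_equiv track=rewrite | github.com/petar-iv/audio-checkworthiness-detection | scripts/custom_models.py | _build_layer_pairs
-- ===== SOURCE A (Python) =====
-- def _build_layer_pairs(input_size, hidden_layer_sizes, output_size):
--   hidden_layer_sizes = [] if hidden_layer_sizes is None else hidden_layer_sizes
--   duplicated_hidden_layer_sizes = []
--   for hidden_layer_size in hidden_layer_sizes:
--     duplicated_hidden_layer_sizes.extend([hidden_layer_size, hidden_layer_size])
--
--   all_sizes = []
--   all_sizes.append(input_size)
--   all_sizes.extend(duplicated_hidden_layer_sizes)
--   all_sizes.append(output_size)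
--
--   layer_pairs = []
--   for i in range(0, len(all_sizes), 2):
--     layer_pairs.append((all_sizes[i], all_sizes[i+1]))
--
--   return layer_pairs
-- ===== SOURCE B (Python) =====
-- def _build_layer_pairs(input_size, hidden_layer_sizes, output_size):
--     hidden = list(hidden_layer_sizes) if hidden_layer_sizes is not None else []
--     seq = [input_size] + hidden + [output_size]
--     return list(zip(seq, seq[1:]))
-- ===== Notes on version B (the rewrite author's own statement) =====
-- stated objective: simpler
-- what changed: Replaces duplicate-each-hidden-size-then-chunk-by-2 with building the single size chain and zipping it with its own tail (adjacent pairs); the duplicated intermediate list and the step-2 index loop disappear.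
import Mathlib
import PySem

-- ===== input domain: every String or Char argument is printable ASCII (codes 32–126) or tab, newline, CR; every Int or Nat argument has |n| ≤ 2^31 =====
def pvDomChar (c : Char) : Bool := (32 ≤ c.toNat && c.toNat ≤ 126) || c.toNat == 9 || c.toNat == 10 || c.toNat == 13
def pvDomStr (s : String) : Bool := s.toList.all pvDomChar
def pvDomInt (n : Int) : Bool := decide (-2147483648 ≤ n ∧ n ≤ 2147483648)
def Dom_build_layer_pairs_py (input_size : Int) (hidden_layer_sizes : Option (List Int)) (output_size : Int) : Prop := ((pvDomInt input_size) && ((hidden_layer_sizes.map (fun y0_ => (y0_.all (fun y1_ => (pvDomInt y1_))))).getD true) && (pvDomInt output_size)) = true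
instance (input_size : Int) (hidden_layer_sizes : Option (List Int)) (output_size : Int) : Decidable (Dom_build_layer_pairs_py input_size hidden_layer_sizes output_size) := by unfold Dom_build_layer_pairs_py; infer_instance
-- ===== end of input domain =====

-- B builds the size chain [input] ++ hidden ++ [output] once and zips it with its tail for the adjacent
-- pairs, instead of A's duplicate-every-hidden-size list plus a step-2 index loop (simpler).


-- ===== PORT A =====
-- A: duplicate every hidden size, prepend input and append output, then chunk by 2.
-- Indices i, i+1 of the step-2 loop are always in range (the list has even length), so pyGetD is exact here.
def build_layer_pairs_py (input_size : Int) (hidden_layer_sizes : Option (List Int)) (output_size : Int) : List (Int × Int) :=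
  let hs := hidden_layer_sizes.getD []
  let duplicated := hs.foldl (fun acc h => acc ++ [h, h]) []
  let all_sizes := [input_size] ++ duplicated ++ [output_size]
  (PySem.List.pyRange 0 (all_sizes.length : Int) 2).foldl
    (fun acc i => acc ++ [(PySem.List.pyGetD all_sizes i 0, PySem.List.pyGetD all_sizes (i + 1) 0)]) []

-- ===== PORT B =====
-- B (simpler): build the single size chain and take adjacent pairs by zipping it with its tail.
def build_layer_pairs_py_alt (input_size : Int) (hidden_layer_sizes : Option (List Int)) (output_size : Int) : List (Int × Int) :=
  let seq := input_size :: (hidden_layer_sizes.getD [] ++ [output_size])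
  seq.zip seq.tail

-- ===== PRECONDITION & SPEC =====
def Spec_build_layer_pairs_py (input_size : Int) (hidden_layer_sizes : Option (List Int)) (output_size : Int) (out : List (Int × Int)) : Prop := out = build_layer_pairs_py_alt input_size hidden_layer_sizes output_size
instance (input_size : Int) (hidden_layer_sizes : Option (List Int)) (output_size : Int) (out : List (Int × Int)) : Decidable (Spec_build_layer_pairs_py input_size hidden_layer_sizes output_size out) := by unfold Spec_build_layer_pairs_py; infer_instance

-- ===== CLAIM (what is proved, stated in full; the proofs are below) =====
def Claim_equal_build_layer_pairs_py : Prop := ∀ (input_size : Int) (hidden_layer_sizes : Option (List Int)) (output_size : Int), Dom_build_layer_pairs_py input_size hidden_layer_sizes output_size → Spec_build_layer_pairs_py input_size hidden_layer_sizes output_size (build_layer_pairs_py input_size hidden_layer_sizes output_size)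

-- ===== LEMMAS AND PROOFS =====

-- ===== VERDICT (by name: the statement is the Claim_ definition above) =====
-- step-2 range over an even positive bound, as the k-th even numbers
lemma pyRange_two_even (m : Nat) (hm : 0 < m) :
    PySem.List.pyRange 0 (2 * (m : Int)) 2 = (List.range m).map (fun k : Nat => (2 * k : Int)) := by
  have h1 : (0 : Int) < 2 * (m : Int) := by exact_mod_cast Nat.mul_pos (by norm_num) hm
  rw [PySem.List.pyRange_of_pos 0 (2 * (m : Int)) (by norm_num), if_pos h1]
  have h2 : ((2 * (m : Int) - 0 + 2 - 1) / 2).toNat = m := by omega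
  rw [h2]
  apply List.map_congr_left
  intro k _
  ring

-- core equality, by induction on the hidden sizes
lemma core (hs : List Int) (inp out : Int) :
    (List.range (hs.length + 1)).map
      (fun k : Nat => ((inp :: (hs.flatMap (fun h => [h, h]) ++ [out])).getD (2 * k) 0,
                       (inp :: (hs.flatMap (fun h => [h, h]) ++ [out])).getD (2 * k + 1) 0))
    = (inp :: (hs ++ [out])).zip (hs ++ [out]) := by
  induction hs generalizing inp with
  | nil => simp
  | cons x xs ih =>
    rw [List.range_succ_eq_map, List.map_cons, List.map_map]
    simp only [List.cons_append, List.zip_cons_cons, List.flatMap_cons, List.length_cons]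
    congr 1
    rw [← ih x]
    apply List.map_congr_left
    intro k _
    simp only [Function.comp_apply, Nat.succ_eq_add_one, List.nil_append,
      show 2 * (k + 1) = 2 * k + 1 + 1 from by ring]
    simp only [List.getD_cons_succ]

theorem build_layer_pairs_py_spec : Claim_equal_build_layer_pairs_py := by
  intro inp hid out _
  unfold Spec_build_layer_pairs_py build_layer_pairs_py build_layer_pairs_py_alt
  set hs := hid.getD [] with hhs
  have hdup : hs.foldl (fun acc h => acc ++ [h, h]) [] = hs.flatMap (fun h => [h, h]) := by
    rw [PySem.List.foldl_append_eq_flatMap]; simp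
  simp only [hdup]
  have hlen : (([inp] ++ hs.flatMap (fun h => [h, h]) ++ [out]).length : Int)
      = 2 * ((hs.length + 1 : Nat) : Int) := by
    simp [List.length_flatMap]; omega
  rw [PySem.List.foldl_append_singleton_eq_map, hlen,
      pyRange_two_even (hs.length + 1) (by omega)]
  simp only [List.map_map, List.nil_append, List.tail_cons]
  rw [← core hs inp out]
  apply List.map_congr_left
  intro k _
  simp only [Function.comp_apply]
  have h1 : (2 : Int) * (k : Int) = ((2 * k : Nat) : Int) := by omega
  rw [h1]
  have h2 : (((2 * k : Nat) : Int)) + 1 = ((2 * k + 1 : Nat) : Int) := by omega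
  rw [h2, PySem.List.pyGetD_natCast, PySem.List.pyGetD_natCast]
  simp
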